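-- pv_equiv track=rewrite | github.com/Abacadabras/algo-python3 | contest_03_semester1/e.py | foo_main
-- ===== SOURCE A (Python) =====
-- def foo_main(num: str) -> int:
--
--     number = 0
--     degree_number = 0
--     base = 20
--
--     for _ in range(len(num) - 1, -1, -1):
--         symbol = num[_]
--         if symbol == ' ':
--             degree_number += 1
--         elif symbol == '|':
--             number += 5 * base**degree_number
--         elif symbol == '.':
--             number += 1 * base**degree_number
--
--     return number
-- ===== SOURCE B (Python) =====
-- def foo_main(num: str) -> int:
--     # Left-to-right Horner evaluation: accumulate the current digit,
--     # multiply the running value by 20 at each space (no base**degree powers).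
--     number = 0
--     digit = 0
--     for ch in num:
--         if ch == ' ':
--             number = number * 20 + digit
--             digit = 0
--         elif ch == '|':
--             digit += 5
--         elif ch == '.':
--             digit += 1
--     return number * 20 + digit
-- ===== Notes on version B (the rewrite author's own statement) =====
-- stated objective: faster
-- what changed: Replaced A's right-to-left indexed loop that recomputes base**degree for every symbol with a single left-to-right Horner pass maintaining a running value and current digit (no exponentiation at all).
import Mathlib
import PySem

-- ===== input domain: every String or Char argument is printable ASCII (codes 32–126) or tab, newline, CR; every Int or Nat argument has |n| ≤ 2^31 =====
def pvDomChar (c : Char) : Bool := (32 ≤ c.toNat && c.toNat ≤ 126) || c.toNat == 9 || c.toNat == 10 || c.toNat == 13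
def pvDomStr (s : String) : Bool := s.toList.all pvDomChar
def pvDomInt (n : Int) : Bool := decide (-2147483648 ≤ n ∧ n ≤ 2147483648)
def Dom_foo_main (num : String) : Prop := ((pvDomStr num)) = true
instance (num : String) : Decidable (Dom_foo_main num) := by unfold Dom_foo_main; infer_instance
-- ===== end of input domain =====

-- B replaces A's right-to-left indexed loop, which recomputes 20**degree at each symbol,
-- by a single left-to-right Horner pass with a running digit (objective: faster).

-- ===== PORT A =====
-- loop body of A: state (number, degree_number); base = 20; degree_number starts at 0 and
-- only ever increases, so Python's base**degree_number is ported as 20 ^ st.2.toNat (exact)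
def fooStepA (st : Int × Int) (symbol : Char) : Int × Int :=
  if symbol = ' ' then (st.1, st.2 + 1)
  else if symbol = '|' then (st.1 + 5 * 20 ^ st.2.toNat, st.2)
  else if symbol = '.' then (st.1 + 1 * 20 ^ st.2.toNat, st.2)
  else st

def foo_main (num : String) : Int :=
  let cs := num.toList
  let st := (PySem.List.pyRange ((cs.length : Int) - 1) (-1) (-1)).foldl
      (fun st i => fooStepA st (PySem.List.pyGetD cs i ' ')) ((0 : Int), (0 : Int))
  st.1

-- ===== PORT B =====
-- loop body of B: state (number, digit)
def fooStepB (st : Int × Int) (ch : Char) : Int × Int :=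
  if ch = ' ' then (st.1 * 20 + st.2, 0)
  else if ch = '|' then (st.1, st.2 + 5)
  else if ch = '.' then (st.1, st.2 + 1)
  else st

def foo_main_alt (num : String) : Int :=
  let st := num.toList.foldl fooStepB ((0 : Int), (0 : Int))
  st.1 * 20 + st.2

-- ===== PRECONDITION & SPEC =====
def Spec_foo_main (num : String) (out : Int) : Prop := out = foo_main_alt num
instance (num : String) (out : Int) : Decidable (Spec_foo_main num out) := by unfold Spec_foo_main; infer_instance

-- ===== CLAIM (what is proved, stated in full; the proofs are below) =====
def Claim_equal_foo_main : Prop := ∀ (num : String), Dom_foo_main num → Spec_foo_main num (foo_main num)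

-- ===== LEMMAS AND PROOFS =====

-- A's degree counter never goes negative
lemma foo_deg_nonneg (cs : List Char) :
    0 ≤ (cs.foldr (fun c st => fooStepA st c) ((0:Int),(0:Int))).2 := by
  induction cs with
  | nil => simp
  | cons c cs ih =>
    simp only [List.foldr_cons]
    set p := cs.foldr (fun c st => fooStepA st c) ((0:Int),(0:Int)) with hp
    simp only [fooStepA]
    split_ifs <;> simp <;> omega

-- Horner invariant: running B from state (a, w) over cs equals a and w weighted by the
-- space count of cs (A's final degree) plus A's fold value
lemma foo_key (cs : List Char) (a w : Int) :
    (cs.foldl fooStepB (a, w)).1 * 20 + (cs.foldl fooStepB (a, w)).2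
    = a * 20 ^ ((cs.foldr (fun c st => fooStepA st c) ((0:Int),(0:Int))).2.toNat + 1)
      + w * 20 ^ (cs.foldr (fun c st => fooStepA st c) ((0:Int),(0:Int))).2.toNat
      + (cs.foldr (fun c st => fooStepA st c) ((0:Int),(0:Int))).1 := by
  induction cs generalizing a w with
  | nil => simp
  | cons c cs ih =>
    simp only [List.foldl_cons, List.foldr_cons]
    set p := cs.foldr (fun c st => fooStepA st c) ((0:Int),(0:Int)) with hp
    by_cases h1 : c = ' '
    · have hB : fooStepB (a, w) c = (a * 20 + w, 0) := by simp [fooStepB, h1]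
      have hA : fooStepA p c = (p.1, p.2 + 1) := by simp [fooStepA, h1]
      rw [hB, hA, ih]
      have ht : (p.2 + 1).toNat = p.2.toNat + 1 := by
        have := foo_deg_nonneg cs; rw [← hp] at this; omega
      simp only [ht]
      ring
    · by_cases h2 : c = '|'
      · have hB : fooStepB (a, w) c = (a, w + 5) := by simp [fooStepB, h2]
        have hA : fooStepA p c = (p.1 + 5 * 20 ^ p.2.toNat, p.2) := by simp [fooStepA, h1, h2]
        rw [hB, hA, ih]; ring
      · by_cases h3 : c = '.'
        · have hB : fooStepB (a, w) c = (a, w + 1) := by simp [fooStepB, h1, h2, h3]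
          have hA : fooStepA p c = (p.1 + 1 * 20 ^ p.2.toNat, p.2) := by simp [fooStepA, h1, h2, h3]
          rw [hB, hA, ih]; ring
        · have hB : fooStepB (a, w) c = (a, w) := by simp [fooStepB, h1, h2, h3]
          have hA : fooStepA p c = p := by simp [fooStepA, h1, h2, h3]
          rw [hB, hA, ih]

-- A's index loop over range(len-1, -1, -1) is a right fold of fooStepA over the characters
lemma foo_reduceA (cs : List Char) :
    (PySem.List.pyRange ((cs.length : Int) - 1) (-1) (-1)).foldl
      (fun st i => fooStepA st (PySem.List.pyGetD cs i ' ')) ((0 : Int), (0 : Int))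
    = cs.foldr (fun c st => fooStepA st c) ((0 : Int), (0 : Int)) := by
  rw [PySem.List.pyRange_neg_one_eq_reverse]
  have h : (-1 : Int) + 1 = 0 := by norm_num
  rw [h]
  have h2 : ((cs.length : Int) - 1) + 1 = (cs.length : Int) := by ring
  rw [h2]
  have hm : ∀ (l : List Int),
      l.foldl (fun st i => fooStepA st (PySem.List.pyGetD cs i ' ')) ((0:Int),(0:Int))
      = (l.map (fun i => PySem.List.pyGetD cs i ' ')).foldl fooStepA ((0:Int),(0:Int)) :=
    fun l => (List.foldl_map ..).symm
  rw [hm, List.map_reverse, PySem.List.map_pyGetD_pyRange_zero', List.foldl_reverse]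

-- ===== VERDICT (by name: the statement is the Claim_ definition above) =====
theorem foo_main_spec : Claim_equal_foo_main := by
  intro num _
  show foo_main num = foo_main_alt num
  simp only [foo_main, foo_main_alt]
  rw [foo_reduceA num.toList]
  have h := foo_key num.toList 0 0
  simp at h ⊢
  omega
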